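-- pv_equiv track=rewrite | github.com/agentscope-ai/TuFT | src/tuft/backends/fsdp_worker_group.py | _actual_shard_sizes
-- ===== SOURCE A (Python) =====
-- def _actual_shard_sizes(total: int, num_shards: int) -> list[int]:
--     """Return the real (unpadded) item count for each shard."""
--     shard_size = max(1, -(-total // num_shards))
--     sizes: list[int] = []
--     remaining = total
--     for _ in range(num_shards):
--         n = min(shard_size, remaining)
--         sizes.append(max(n, 0))
--         remaining -= shard_size
--     return sizes
-- ===== SOURCE B (Python) =====
-- def _actual_shard_sizes(total: int, num_shards: int) -> list[int]:
--     """Return the real (unpadded) item count for each shard."""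
--     shard_size = max(1, -(-total // num_shards))
--     full, rem = divmod(total, shard_size)
--     sizes = [shard_size] * min(full, num_shards)
--     if rem > 0 and len(sizes) < num_shards:
--         sizes.append(rem)
--     sizes += [0] * (num_shards - len(sizes))
--     return sizes
-- ===== Notes on version B (the rewrite author's own statement) =====
-- stated objective: faster
-- what changed: A threads a `remaining` accumulator through a per-shard Python loop of min/max updates; B computes divmod(total, shard_size) once and constructs the list directly as full shards + optional remainder + zero padding (C-level list repetition, no per-element loop).
-- outside the precondition, e.g. on _actual_shard_sizes(5, 0): A raises ZeroDivisionError, B raises ZeroDivisionError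
import Mathlib
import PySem

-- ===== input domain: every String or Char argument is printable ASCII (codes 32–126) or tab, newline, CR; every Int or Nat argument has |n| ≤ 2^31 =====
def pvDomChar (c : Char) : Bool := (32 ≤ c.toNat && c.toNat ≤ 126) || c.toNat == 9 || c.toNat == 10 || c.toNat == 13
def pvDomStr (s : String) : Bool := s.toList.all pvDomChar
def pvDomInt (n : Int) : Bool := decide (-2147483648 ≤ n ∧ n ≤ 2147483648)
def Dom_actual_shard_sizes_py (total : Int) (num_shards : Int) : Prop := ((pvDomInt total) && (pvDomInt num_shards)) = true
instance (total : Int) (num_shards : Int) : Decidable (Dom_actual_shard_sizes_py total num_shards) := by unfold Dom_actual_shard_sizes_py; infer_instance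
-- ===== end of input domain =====

-- B replaces A's per-shard loop threading a `remaining` accumulator by a divmod count-then-construct
-- (full shards, optional remainder, zero padding); same return value, different decomposition.

-- ===== PORT A =====
def actual_shard_sizes_py (total : Int) (num_shards : Int) : List Int :=
  let shard_size := max 1 (-(PySem.Int.floordiv (-total) num_shards))
  ((PySem.List.pyRange 0 num_shards 1).foldl
    (fun (st : List Int × Int) _ =>
      let n := min shard_size st.2
      (st.1 ++ [max n 0], st.2 - shard_size))
    ([], total)).1

-- ===== PORT B =====
def actual_shard_sizes_py_alt (total : Int) (num_shards : Int) : List Int :=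
  let shard_size := max 1 (-(PySem.Int.floordiv (-total) num_shards))
  let full := PySem.Int.floordiv total shard_size
  let rem := PySem.Int.mod total shard_size
  let sizes := List.replicate (min full num_shards).toNat shard_size
  let sizes := if 0 < rem ∧ (sizes.length : Int) < num_shards then sizes ++ [rem] else sizes
  sizes ++ List.replicate (num_shards - (sizes.length : Int)).toNat (0 : Int)

-- ===== PRECONDITION & SPEC =====
-- Pre_ excludes exactly num_shards = 0, where both A and B raise ZeroDivisionError.
def Pre_actual_shard_sizes_py (total : Int) (num_shards : Int) : Prop := num_shards ≠ 0
instance (total : Int) (num_shards : Int) : Decidable (Pre_actual_shard_sizes_py total num_shards) := by unfold Pre_actual_shard_sizes_py; infer_instance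
def pvWitness_actual_shard_sizes_py : Int × Int := (7, 3)

def Spec_actual_shard_sizes_py (total : Int) (num_shards : Int) (out : List Int) : Prop := out = actual_shard_sizes_py_alt total num_shards
instance (total : Int) (num_shards : Int) (out : List Int) : Decidable (Spec_actual_shard_sizes_py total num_shards out) := by unfold Spec_actual_shard_sizes_py; infer_instance

-- ===== CLAIM (what is proved, stated in full; the proofs are below) =====
def Claim_equal_actual_shard_sizes_py : Prop := ∀ (total : Int) (num_shards : Int), Dom_actual_shard_sizes_py total num_shards → Pre_actual_shard_sizes_py total num_shards → Spec_actual_shard_sizes_py total num_shards (actual_shard_sizes_py total num_shards)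

-- ===== LEMMAS AND PROOFS =====

-- A's loop, in closed form: the i-th appended element is max (min s (r - i*s)) 0.
theorem pvLoopA (s : Int) (l : List Int) : ∀ (acc : List Int) (r : Int),
    (l.foldl
      (fun (st : List Int × Int) _ =>
        let n := min s st.2
        (st.1 ++ [max n 0], st.2 - s)) (acc, r)).1
    = acc ++ (List.range l.length).map (fun i : Nat => max (min s (r - (i : Int) * s)) 0) := by
  induction l with
  | nil => simp
  | cons x l ih =>
    intro acc r
    simp only [List.foldl_cons, List.length_cons]
    rw [ih, List.range_succ_eq_map]
    simp only [List.map_cons, List.map_map, List.append_assoc, List.cons_append,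
      List.nil_append, Nat.cast_zero, zero_mul, sub_zero]
    congr 2
    apply List.map_congr_left
    intro i _
    simp only [Function.comp]
    push_cast
    ring_nf

theorem pvA_eq_map (total num_shards : Int) :
    actual_shard_sizes_py total num_shards
    = (List.range num_shards.toNat).map
        (fun i : Nat =>
          max (min (max 1 (-(PySem.Int.floordiv (-total) num_shards))) (total - (i : Int) * (max 1 (-(PySem.Int.floordiv (-total) num_shards))))) 0) := by
  unfold actual_shard_sizes_py
  rw [pvLoopA]
  simp [PySem.List.length_pyRange_one]

-- B's construction, in the same closed form, abstracted over the divmod decomposition.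
theorem pvB_core (s full rem n : Int) (hs1 : 1 ≤ s) (hn : 0 < n)
    (hr0 : 0 ≤ rem) (hrs : rem < s)
    (hkey : 0 < rem → 0 ≤ full ∧ full < n) :
    ((if 0 < rem ∧ ((List.replicate (min full n).toNat s).length : Int) < n
        then List.replicate (min full n).toNat s ++ [rem]
        else List.replicate (min full n).toNat s)
      ++ List.replicate (n - (((if 0 < rem ∧ ((List.replicate (min full n).toNat s).length : Int) < n
        then List.replicate (min full n).toNat s ++ [rem]
        else List.replicate (min full n).toNat s).length : Int))).toNat (0 : Int))
    = (List.range n.toNat).map (fun i : Nat => max (min s ((full * s + rem) - (i : Int) * s)) 0) := by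
  by_cases hc : 0 < rem ∧ (((List.replicate (min full n).toNat s).length : Int) < n)
  · obtain ⟨hf0, hfn⟩ := hkey hc.1
    have hmlen : ((List.replicate (min full n).toNat s).length : Int) = full := by
      simp only [List.length_replicate]; omega
    rw [if_pos hc]
    apply List.ext_getElem
    · simp only [List.length_append, List.length_replicate, List.length_cons, List.length_nil,
        List.length_map, List.length_range]
      simp only [List.length_replicate] at hmlen hc
      omega
    · intro i h1 h2
      simp only [List.length_map, List.length_range] at h2
      simp only [List.getElem_map, List.getElem_range]
      simp only [List.length_replicate] at hmlen hc
      rcases Nat.lt_trichotomy i (min full n).toNat with hi | hi | hi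
      · rw [List.getElem_append_left (by simp only [List.length_append, List.length_replicate,
          List.length_cons, List.length_nil]; omega),
          List.getElem_append_left (by simp only [List.length_replicate]; omega),
          List.getElem_replicate]
        have hfi : (1 : Int) ≤ full - (i : Int) := by omega
        have hmul := mul_le_mul_of_nonneg_right hfi (by omega : (0:Int) ≤ s)
        have hge : s ≤ full * s + rem - (i : Int) * s := by nlinarith
        omega
      · rw [List.getElem_append_left (by simp only [List.length_append, List.length_replicate,
          List.length_cons, List.length_nil]; omega),
          List.getElem_append_right (by simp only [List.length_replicate]; omega)]
        simp only [List.length_replicate, hi, Nat.sub_self, List.getElem_cons_zero]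
        have : full * s + rem - (((min full n).toNat : Int)) * s = rem := by
          rw [hmlen]; ring
        rw [this]
        omega
      · rw [List.getElem_append_right (by simp only [List.length_append, List.length_replicate,
          List.length_cons, List.length_nil]; omega), List.getElem_replicate]
        have hfi : full - (i : Int) ≤ -1 := by omega
        have hmul := mul_le_mul_of_nonneg_right hfi (by omega : (0:Int) ≤ s)
        have hle : full * s + rem - (i : Int) * s ≤ 0 := by nlinarith
        omega
  · rw [if_neg hc]
    have hrem0 : rem = 0 ∨ n ≤ min full n := by
      rcases Int.lt_or_le 0 rem with h | h
      · right
        have := (hkey h).2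
        simp only [List.length_replicate, not_and, not_lt] at hc
        have := hc h
        omega
      · left; omega
    apply List.ext_getElem
    · simp only [List.length_append, List.length_replicate, List.length_map, List.length_range]
      omega
    · intro i h1 h2
      simp only [List.length_map, List.length_range] at h2
      simp only [List.getElem_map, List.getElem_range]
      rcases Nat.lt_or_ge i (min full n).toNat with hi | hi
      · rw [List.getElem_append_left (by simp only [List.length_replicate]; omega),
          List.getElem_replicate]
        have hfi : (1 : Int) ≤ full - (i : Int) := by omega
        have hmul := mul_le_mul_of_nonneg_right hfi (by omega : (0:Int) ≤ s)
        have hge : s ≤ full * s + rem - (i : Int) * s := by nlinarith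
        omega
      · rw [List.getElem_append_right (by simp only [List.length_replicate]; omega),
          List.getElem_replicate]
        have hrem : rem = 0 := by
          rcases hrem0 with h | h
          · exact h
          · omega
        have hfi : full - (i : Int) ≤ 0 := by omega
        have hmul := mul_le_mul_of_nonneg_right hfi (by omega : (0:Int) ≤ s)
        have hle : full * s + rem - (i : Int) * s ≤ 0 := by nlinarith
        omega

theorem pvShard_pos_facts (total num_shards : Int) (hn : 0 < num_shards) :
    0 < PySem.Int.mod total (max 1 (-(PySem.Int.floordiv (-total) num_shards))) →
    0 ≤ PySem.Int.floordiv total (max 1 (-(PySem.Int.floordiv (-total) num_shards))) ∧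
    PySem.Int.floordiv total (max 1 (-(PySem.Int.floordiv (-total) num_shards))) < num_shards := by
  intro hrpos
  set c := -(PySem.Int.floordiv (-total) num_shards) with hcdef
  set s := max 1 c with hsdef
  have hs1 : 1 ≤ s := le_max_left _ _
  have hs2 : 2 ≤ s := by
    rcases eq_or_lt_of_le hs1 with h | h
    · exfalso
      have : PySem.Int.mod total 1 = 0 :=
        (PySem.Int.mod_eq_zero_iff_dvd total 1).mpr (one_dvd _)
      rw [← h] at hrpos
      omega
    · omega
  have hc : c = s := by omega
  have hb : (s - 1) * num_shards < total ∧ total ≤ s * num_shards := by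
    rw [hcdef] at hc
    exact (PySem.Int.neg_floordiv_neg_eq_iff_of_pos hn).mp hc
  have ht0 : 0 < total := by
    have h1 : num_shards ≤ (s - 1) * num_shards :=
      le_mul_of_one_le_left (by omega) (by omega)
    omega
  have hdm := PySem.Int.floordiv_mul_add_mod total s
  have hr0 : 0 ≤ PySem.Int.mod total s := PySem.Int.mod_nonneg _ (by omega)
  have hrs : PySem.Int.mod total s < s := PySem.Int.mod_lt _ (by omega)
  set full := PySem.Int.floordiv total s with hfdef
  set rem := PySem.Int.mod total s with hrdef
  constructor
  · by_contra h'
    push_neg at h'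
    have : full * s ≤ -1 * s := mul_le_mul_of_nonneg_right (by omega) (by omega)
    nlinarith
  · have h1 : full * s < num_shards * s := by nlinarith
    exact lt_of_mul_lt_mul_right (by nlinarith) (by omega : (0:Int) ≤ s)

-- ===== VERDICT (by name: the statement is the Claim_ definition above) =====
theorem actual_shard_sizes_py_spec : Claim_equal_actual_shard_sizes_py := by
  intro total num_shards _ hpre
  unfold Spec_actual_shard_sizes_py actual_shard_sizes_py_alt
  rw [pvA_eq_map]
  simp only []
  set s := max 1 (-(PySem.Int.floordiv (-total) num_shards)) with hsdef
  have hs1 : 1 ≤ s := le_max_left _ _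
  rcases lt_or_gt_of_ne hpre with hn | hn
  · -- num_shards < 0: both sides are []
    have h0 : num_shards.toNat = 0 := by omega
    have hmin : (min (PySem.Int.floordiv total s) num_shards).toNat = 0 := by omega
    rw [h0, hmin]
    simp only [List.replicate_zero, List.length_nil, Nat.cast_zero, List.range_zero,
      List.map_nil]
    rw [if_neg (by omega)]
    simp only [List.length_nil, Nat.cast_zero]
    have hpad : (num_shards - 0).toNat = 0 := by omega
    rw [hpad]
    simp
  · -- 0 < num_shards
    have hdm := PySem.Int.floordiv_mul_add_mod total s
    have hr0 : 0 ≤ PySem.Int.mod total s := PySem.Int.mod_nonneg _ (by omega)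
    have hrs : PySem.Int.mod total s < s := PySem.Int.mod_lt _ (by omega)
    have hkey := pvShard_pos_facts total num_shards hn
    rw [← hsdef] at hkey
    rw [pvB_core s (PySem.Int.floordiv total s) (PySem.Int.mod total s) num_shards hs1 hn
      hr0 hrs hkey]
    apply List.map_congr_left
    intro i _
    rw [hdm]
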